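-- pv_equiv track=rewrite | github.com/AngelGUst/integradora-8B-RAMA-DEV-SpeakBranchAI | backend/questions/services/adaptive_service.py | _balance_type_targets
-- ===== SOURCE A (Python) =====
-- from typing import Iterable, List, Optional, Set
--
-- def _balance_type_targets(ordered_types: List[str], final_count: int) -> dict:
--     """
--     Distribute question count across types, prioritizing less-practiced types.
--     Returns dict mapping type -> target count.
--     """
--     targets = dict.fromkeys(ordered_types, 0)
--
--     # Give one slot to each available type first
--     remaining = final_count
--     for t in ordered_types:
--         if remaining <= 0:
--             break
--         targets[t] += 1
--         remaining -= 1
--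
--     # Round-robin remaining slots prioritizing less-practiced types
--     idx = 0
--     while remaining > 0 and ordered_types:
--         t = ordered_types[idx % len(ordered_types)]
--         targets[t] += 1
--         remaining -= 1
--         idx += 1
--
--     return targets
-- ===== SOURCE B (Python) =====
-- from typing import List
--
-- def _balance_type_targets(ordered_types: List[str], final_count: int) -> dict:
--     """
--     Distribute question count across types arithmetically: position i of the
--     ordered list receives final_count // n slots plus one extra slot if
--     i < final_count % n; per-key totals sum the positions holding that key.
--     """
--     targets = dict.fromkeys(ordered_types, 0)
--     n = len(ordered_types)
--     if n == 0:
--         return targets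
--     k = max(final_count, 0)
--     q, r = divmod(k, n)
--     i = 0
--     for t in ordered_types:
--         targets[t] += q + (1 if i < r else 0)
--         i += 1
--     return targets
-- ===== Notes on version B (the rewrite author's own statement) =====
-- stated objective: alternative
-- what changed: Replaces the one-slot-at-a-time seeding loop plus round-robin while loop (final_count iterations) with a closed-form divmod: position i gets final_count//n plus one if i < final_count%n, accumulated per key in a single pass over the list.
import Mathlib
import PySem

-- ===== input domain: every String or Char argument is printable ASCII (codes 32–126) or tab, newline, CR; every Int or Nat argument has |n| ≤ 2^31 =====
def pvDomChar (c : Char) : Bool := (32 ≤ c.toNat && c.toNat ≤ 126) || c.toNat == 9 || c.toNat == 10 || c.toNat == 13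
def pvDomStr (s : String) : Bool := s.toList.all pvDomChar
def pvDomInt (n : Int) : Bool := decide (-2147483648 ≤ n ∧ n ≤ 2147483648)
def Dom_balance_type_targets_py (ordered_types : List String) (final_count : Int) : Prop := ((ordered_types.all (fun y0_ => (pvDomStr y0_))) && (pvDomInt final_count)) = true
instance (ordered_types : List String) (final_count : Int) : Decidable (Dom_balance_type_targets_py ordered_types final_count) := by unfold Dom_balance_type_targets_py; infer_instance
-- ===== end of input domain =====

-- B replaces A's slot-at-a-time seeding + round-robin loops by a closed-form
-- divmod giving each position its total share in one pass over the list.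

-- ===== PORT A =====

-- first loop: one slot per type until remaining ≤ 0 (the 'break')
def pvSeed (ts : List String) (d : PySem.Dict String Int) (remaining : Int) :
    PySem.Dict String Int × Int :=
  match ts with
  | [] => (d, remaining)
  | t :: rest =>
    if remaining ≤ 0 then (d, remaining)
    else pvSeed rest (d.modify t 0 (· + 1)) (remaining - 1)

-- second loop: while remaining > 0 and ordered_types: targets[ts[idx % len]] += 1
def pvRR (ts : List String) (d : PySem.Dict String Int) (remaining idx : Int) :
    PySem.Dict String Int :=
  if h : 0 < remaining ∧ ts ≠ [] then
    pvRR ts (d.modify (PySem.List.pyGetD ts (PySem.Int.mod idx (ts.length : Int)) "") 0 (· + 1))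
      (remaining - 1) (idx + 1)
  else d
termination_by remaining.toNat
decreasing_by omega

def balance_type_targets_py (ordered_types : List String) (final_count : Int) : List (String × Int) :=
  let targets := ordered_types.foldl (fun d t => d.insert t 0) PySem.Dict.empty
  let sr := pvSeed ordered_types targets final_count
  (pvRR ordered_types sr.1 sr.2 0).items

-- ===== PORT B =====

def balance_type_targets_py_alt (ordered_types : List String) (final_count : Int) : List (String × Int) :=
  let targets := ordered_types.foldl (fun d t => d.insert t 0) PySem.Dict.empty
  let n : Int := ordered_types.length
  if n = 0 then targets.items
  else
    let k := max final_count 0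
    let q := PySem.Int.floordiv k n
    let r := PySem.Int.mod k n
    -- for t in ordered_types: targets[t] += q + (1 if i < r else 0); i += 1
    (ordered_types.foldl
      (fun (st : Int × PySem.Dict String Int) t =>
        (st.1 + 1, st.2.modify t 0 (· + (q + (if st.1 < r then 1 else 0)))))
      (0, targets)).2.items

-- ===== PRECONDITION & SPEC =====
def Spec_balance_type_targets_py (ordered_types : List String) (final_count : Int) (out : List (String × Int)) : Prop := out = balance_type_targets_py_alt ordered_types final_count
instance (ordered_types : List String) (final_count : Int) (out : List (String × Int)) : Decidable (Spec_balance_type_targets_py ordered_types final_count out) := by unfold Spec_balance_type_targets_py; infer_instance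

-- ===== CLAIM (what is proved, stated in full; the proofs are below) =====
def Claim_equal_balance_type_targets_py : Prop := ∀ (ordered_types : List String) (final_count : Int), Dom_balance_type_targets_py ordered_types final_count → Spec_balance_type_targets_py ordered_types final_count (balance_type_targets_py ordered_types final_count)

-- ===== LEMMAS AND PROOFS =====

-- positions hit by the round-robin loop, starting at offset i, m steps
def pvHits (ts : List String) (i m : Nat) : List String :=
  (List.range m).map (fun j => ts.getD ((i + j) % ts.length) "")

-- the initial dict maps every key to 0
theorem pv_init_getD (ts : List String) (d : PySem.Dict String Int) (v : String)
    (h : d.getD v 0 = 0) :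
    (ts.foldl (fun d t => d.insert t 0) d).getD v 0 = 0 := by
  induction ts generalizing d with
  | nil => exact h
  | cons t rest ih =>
    simp only [List.foldl_cons]
    exact ih _ (by rw [PySem.Dict.getD_insert]; split <;> simp [h])

theorem pv_seed_fst (ts : List String) (d : PySem.Dict String Int) (rem : Int) :
    (pvSeed ts d rem).1 =
      (ts.take rem.toNat).foldl (fun d t => d.modify t 0 (· + 1)) d := by
  induction ts generalizing d rem with
  | nil => simp [pvSeed]
  | cons t rest ih =>
    by_cases h : rem ≤ 0
    · have : rem.toNat = 0 := by omega
      simp [pvSeed, h, this]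
    · have h1 : rem.toNat = (rem - 1).toNat + 1 := by omega
      simp only [pvSeed, if_neg h, h1, List.take_succ_cons, List.foldl_cons]
      exact ih _ _

theorem pv_seed_snd (ts : List String) (d : PySem.Dict String Int) (rem : Int) :
    (pvSeed ts d rem).2 = rem - ((min rem.toNat ts.length : Nat) : Int) := by
  induction ts generalizing d rem with
  | nil => simp [pvSeed]
  | cons t rest ih =>
    by_cases h : rem ≤ 0
    · simp [pvSeed, h]; omega
    · simp only [pvSeed, if_neg h, ih, List.length_cons]
      omega

theorem pv_rr_eq_fold (m : Nat) : ∀ (ts : List String) (d : PySem.Dict String Int)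
    (rem idx : Int), ts ≠ [] → 0 ≤ idx → rem.toNat = m →
    pvRR ts d rem idx =
      (pvHits ts idx.toNat m).foldl (fun d t => d.modify t 0 (· + 1)) d := by
  induction m with
  | zero =>
    intro ts d rem idx hts hidx hm
    rw [pvRR]
    simp only [pvHits, List.range_zero, List.map_nil, List.foldl_nil]
    have : ¬ (0 < rem ∧ ts ≠ []) := by
      rintro ⟨h1, _⟩; omega
    simp [this]
  | succ m ih =>
    intro ts d rem idx hts hidx hm
    have hn : 0 < ts.length := List.length_pos_of_ne_nil hts
    have hrem : 0 < rem := by omega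
    rw [pvRR]
    simp only [dif_pos (And.intro hrem hts)]
    have hmod : PySem.Int.mod idx (ts.length : Int) = ((idx.toNat % ts.length : Nat) : Int) := by
      rw [PySem.Int.mod_eq_emod_of_pos (by exact_mod_cast hn), ← Int.toNat_of_nonneg hidx]
      push_cast
      simp
    have hget : PySem.List.pyGetD ts (PySem.Int.mod idx (ts.length : Int)) "" =
        ts.getD (idx.toNat % ts.length) "" := by
      rw [hmod, PySem.List.pyGetD_of_nonneg _ _ (by positivity), Int.toNat_natCast]
    have hhits : pvHits ts idx.toNat (m + 1) =
        ts.getD (idx.toNat % ts.length) "" :: pvHits ts (idx.toNat + 1) m := by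
      simp only [pvHits, List.range_succ_eq_map, List.map_cons, Nat.add_zero, List.map_map]
      congr 1
      apply List.map_congr_left
      intro j _
      simp only [Function.comp_apply, Nat.succ_eq_add_one]
      congr 2
      omega
    rw [hhits, List.foldl_cons, hget]
    have := ih ts (d.modify (ts.getD (idx.toNat % ts.length) "") 0 (· + 1)) (rem - 1) (idx + 1)
      hts (by omega) (by omega)
    rw [this]
    congr 2
    omega

theorem pv_hits_small (ts : List String) (m : Nat) (h : m ≤ ts.length) :
    pvHits ts 0 m = ts.take m := by
  apply List.ext_getElem
  · simp [pvHits, h]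
  · intro i h1 h2
    simp only [pvHits, List.length_map, List.length_range] at h1
    simp only [pvHits, List.getElem_map, List.getElem_range, Nat.zero_add,
      List.getElem_take]
    rw [Nat.mod_eq_of_lt (by omega), List.getD_eq_getElem ts "" (by omega)]

theorem pv_hits_cycle (ts : List String) (m : Nat) (hts : ts ≠ []) :
    pvHits ts 0 (ts.length + m) = ts ++ pvHits ts 0 m := by
  have hn : 0 < ts.length := List.length_pos_of_ne_nil hts
  simp only [pvHits, List.range_add, List.map_append, List.map_map]
  congr 1
  · have := pv_hits_small ts ts.length le_rfl
    simpa [pvHits, List.take_of_length_le] using this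
  · apply List.map_congr_left
    intro j _
    simp only [Function.comp_apply]
    congr 1
    simp [Nat.add_mod_left]

theorem pv_count_hits (ts : List String) (v : String) (hts : ts ≠ []) :
    ∀ m : Nat, (pvHits ts 0 m).count v =
      (m / ts.length) * ts.count v + (ts.take (m % ts.length)).count v := by
  have hn : 0 < ts.length := List.length_pos_of_ne_nil hts
  intro m
  induction m using Nat.strong_induction_on with
  | _ m ih =>
    by_cases h : m < ts.length
    · rw [pv_hits_small ts m (by omega), Nat.div_eq_of_lt h, Nat.mod_eq_of_lt h]
      simp
    · have hm : m = ts.length + (m - ts.length) := by omega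
      rw [hm, pv_hits_cycle ts _ hts, List.count_append,
        ih (m - ts.length) (by omega)]
      have hdiv : (ts.length + (m - ts.length)) / ts.length = (m - ts.length) / ts.length + 1 := by
        rw [Nat.add_comm, Nat.add_div_right _ hn]
      have hmod : (ts.length + (m - ts.length)) % ts.length = (m - ts.length) % ts.length := by
        rw [Nat.add_comm, Nat.add_mod_right]
      rw [hdiv, hmod]
      ring

-- B's fold: value at v adds q per occurrence plus 1 for occurrences before index r
theorem pv_bfold_getD (q r : Int) (v : String) :
    ∀ (ts : List String) (d : PySem.Dict String Int) (i0 : Int),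
    ((ts.foldl
      (fun (st : Int × PySem.Dict String Int) t =>
        (st.1 + 1, st.2.modify t 0 (· + (q + (if st.1 < r then 1 else 0)))))
      (i0, d)).2).getD v 0
    = d.getD v 0 + q * (ts.count v : Int) + ((ts.take (r - i0).toNat).count v : Int) := by
  intro ts
  induction ts with
  | nil => simp
  | cons t rest ih =>
    intro d i0
    simp only [List.foldl_cons]
    rw [ih, PySem.Dict.getD_modify]
    by_cases hlt : i0 < r
    · have h1 : (r - i0).toNat = (r - (i0 + 1)).toNat + 1 := by omega
      rw [h1, List.take_succ_cons]
      by_cases hv : v = t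
      · subst hv
        simp only [if_pos hlt, List.count_cons_self]
        push_cast; ring
      · have hne : ¬ t = v := fun h => hv h.symm
        simp only [if_neg hv, List.count_cons, beq_iff_eq, hne, if_false]
        push_cast; ring
    · have h0 : (r - i0).toNat = 0 := by omega
      have h0' : (r - (i0 + 1)).toNat = 0 := by omega
      simp only [h0, h0', List.take_zero, List.count_nil]
      by_cases hv : v = t
      · subst hv
        simp only [if_neg hlt, List.count_cons_self]
        push_cast; ring
      · have hne : ¬ t = v := fun h => hv h.symm
        simp only [if_neg hv, List.count_cons, beq_iff_eq, hne, if_false]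
        push_cast; ring

-- keys bookkeeping -------------------------------------------------------------

theorem pv_keys_modify_add (d : PySem.Dict String Int) (k : String) (d0 : Int)
    (f : Int → Int) : (d.modify k d0 f).keys = PySem.Set.add d.keys k := by
  rw [PySem.Dict.keys_modify]
  by_cases h : d.contains k = true
  · rw [PySem.Dict.keys_insert_of_contains _ _ h]
    have hk : k ∈ d.keys := (PySem.Dict.contains_iff_mem_keys d k).1 h
    simp [PySem.Set.add, PySem.Set.contains, hk]
  · rw [PySem.Dict.keys_insert_of_not_contains _ _ (by simpa using h)]
    have hk : k ∉ d.keys := fun hm =>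
      (by simp [(PySem.Dict.contains_iff_mem_keys d k).2 hm] at h)
    simp [PySem.Set.add, PySem.Set.contains, hk]

theorem pv_set_update_self (l : List String) : ∀ (s : PySem.Set String),
    (∀ x ∈ l, x ∈ s) → PySem.Set.update s l = s := by
  induction l with
  | nil => intro s _; rfl
  | cons x l ih =>
    intro s hs
    have hx : PySem.Set.add s x = s := by
      simp [PySem.Set.add, PySem.Set.contains, hs x (by simp)]
    calc PySem.Set.update s (x :: l) = PySem.Set.update (PySem.Set.add s x) l := rfl
      _ = PySem.Set.update s l := by rw [hx]
      _ = s := ih s (fun y hy => hs y (by simp [hy]))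

theorem pv_bfold_keys (q r : Int) :
    ∀ (ts : List String) (st : Int × PySem.Dict String Int),
    ((ts.foldl
      (fun (st : Int × PySem.Dict String Int) t =>
        (st.1 + 1, st.2.modify t 0 (· + (q + (if st.1 < r then 1 else 0)))))
      st).2).keys = PySem.Set.update (st.2).keys ts := by
  intro ts
  induction ts with
  | nil => simp [PySem.Set.update]
  | cons t rest ih =>
    intro st
    simp only [List.foldl_cons]
    rw [ih, pv_keys_modify_add]
    rfl

theorem pv_hits_subset (ts : List String) (i m : Nat) (hts : ts ≠ []) :
    ∀ x ∈ pvHits ts i m, x ∈ ts := by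
  have hn : 0 < ts.length := List.length_pos_of_ne_nil hts
  intro x hx
  simp only [pvHits, List.mem_map, List.mem_range] at hx
  obtain ⟨j, _, rfl⟩ := hx
  rw [List.getD_eq_getElem ts "" (Nat.mod_lt _ hn)]
  exact List.getElem_mem _

-- the per-key counting identity: seeding + round-robin = divmod share
theorem pv_count_identity (ts : List String) (v : String) (hts : ts ≠ []) (F : Nat) :
    (ts.take F).count v + (pvHits ts 0 (F - min F ts.length)).count v
      = (F / ts.length) * ts.count v + (ts.take (F % ts.length)).count v := by
  have hn : 0 < ts.length := List.length_pos_of_ne_nil hts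
  rw [pv_count_hits ts v hts]
  by_cases hF : F ≤ ts.length
  · have hM : F - min F ts.length = 0 := by omega
    rw [hM]
    simp only [Nat.zero_div, Nat.zero_mod, List.take_zero, List.count_nil, Nat.zero_mul,
      Nat.add_zero]
    by_cases hFlt : F < ts.length
    · rw [Nat.div_eq_of_lt hFlt, Nat.mod_eq_of_lt hFlt, Nat.zero_mul, Nat.zero_add]
    · have hFeq : F = ts.length := by omega
      rw [hFeq, List.take_of_length_le le_rfl, Nat.div_self hn, Nat.mod_self, List.take_zero,
        List.count_nil, Nat.one_mul, Nat.add_zero]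
  · have hM : F - min F ts.length = F - ts.length := by omega
    rw [hM]
    have hdiv : F / ts.length = (F - ts.length) / ts.length + 1 := by
      conv_lhs => rw [show F = (F - ts.length) + ts.length by omega]
      rw [Nat.add_div_right _ hn]
    have hmod : F % ts.length = (F - ts.length) % ts.length := by
      conv_lhs => rw [show F = (F - ts.length) + ts.length by omega]
      rw [Nat.add_mod_right]
    rw [List.take_of_length_le (by omega), hdiv, hmod]
    ring

theorem pv_main (ts : List String) (fc : Int) :
    balance_type_targets_py ts fc = balance_type_targets_py_alt ts fc := by
  by_cases hts : ts = []
  · subst hts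
    simp only [balance_type_targets_py, balance_type_targets_py_alt, List.foldl_nil,
      List.length_nil, pvSeed]
    rw [pvRR]
    simp
  · have hn : 0 < ts.length := List.length_pos_of_ne_nil hts
    have hnz : (ts.length : Int) ≠ 0 := by exact_mod_cast hn.ne'
    simp only [balance_type_targets_py, balance_type_targets_py_alt, if_neg hnz]
    set init : PySem.Dict String Int := ts.foldl (fun d t => d.insert t 0) PySem.Dict.empty with hinit
    set F := fc.toNat with hF
    set M : Int := fc - ((min F ts.length : Nat) : Int) with hM
    have hA : pvRR ts (pvSeed ts init fc).1 (pvSeed ts init fc).2 0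
        = (pvHits ts 0 M.toNat).foldl (fun d t => d.modify t 0 (· + 1))
            ((ts.take F).foldl (fun d t => d.modify t 0 (· + 1)) init) := by
      rw [pv_seed_fst, pv_seed_snd, ← hF, ← hM]
      rw [pv_rr_eq_fold M.toNat ts _ M 0 hts le_rfl rfl]
      simp only [Int.toNat_zero]
    rw [hA]
    have keysInit : init.keys = PySem.Set.ofList ts := by
      rw [hinit, PySem.Dict.keys_foldl_insert (f := fun _ _ => (0 : Int))]
      rw [PySem.Dict.keys_empty]
      rfl
    have keysA : ((pvHits ts 0 M.toNat).foldl (fun d t => d.modify t 0 (· + 1))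
        ((ts.take F).foldl (fun d t => d.modify t 0 (· + 1)) init)).keys
        = PySem.Set.ofList ts := by
      rw [PySem.Dict.keys_foldl_modify _ _ (fun _ _ => (· + 1)),
        PySem.Dict.keys_foldl_modify _ _ (fun _ _ => (· + 1)), keysInit]
      rw [pv_set_update_self _ _
        (fun x hx => (PySem.Set.mem_ofList ts x).2 (List.mem_of_mem_take hx))]
      exact pv_set_update_self _ _
        (fun x hx => (PySem.Set.mem_ofList ts x).2 (pv_hits_subset ts 0 M.toNat hts x hx))
    have keysB : ((ts.foldl
        (fun (st : Int × PySem.Dict String Int) t =>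
          (st.1 + 1, st.2.modify t 0 (· + (PySem.Int.floordiv (max fc 0) (ts.length : Int) +
            (if st.1 < PySem.Int.mod (max fc 0) (ts.length : Int) then 1 else 0)))))
        (0, init)).2).keys = PySem.Set.ofList ts := by
      rw [pv_bfold_keys, keysInit]
      exact pv_set_update_self _ _ (fun x hx => (PySem.Set.mem_ofList ts x).2 hx)
    rw [PySem.Dict.items_eq_map_keys _ (by rw [keysA]; exact PySem.Set.nodup_ofList ts) 0,
      PySem.Dict.items_eq_map_keys _ (by rw [keysB]; exact PySem.Set.nodup_ofList ts) 0,
      keysA, keysB]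
    apply List.map_congr_left
    intro v hv
    simp only [Prod.mk.injEq, true_and]
    have hinit0 : init.getD v 0 = 0 :=
      pv_init_getD ts PySem.Dict.empty v (PySem.Dict.getD_empty v 0)
    rw [PySem.Dict.getD_foldl_modify_add_one, PySem.Dict.getD_foldl_modify_add_one,
      pv_bfold_getD, hinit0]
    have hmax : max fc 0 = ((F : Nat) : Int) := by omega
    rw [hmax, PySem.Int.floordiv_natCast, PySem.Int.mod_natCast]
    simp only [Int.sub_zero, Int.toNat_natCast]
    have hMt : M.toNat = F - min F ts.length := by omega
    rw [hMt]
    have hid := pv_count_identity ts v hts F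
    have : ((ts.take F).count v : Int) + ((pvHits ts 0 (F - min F ts.length)).count v : Int)
        = ((F / ts.length : Nat) : Int) * (ts.count v : Int)
          + ((ts.take (F % ts.length)).count v : Int) := by
      exact_mod_cast congrArg (Nat.cast : Nat → Int) hid
    push_cast at this ⊢
    linarith [this]

-- ===== VERDICT (by name: the statement is the Claim_ definition above) =====
theorem balance_type_targets_py_spec : Claim_equal_balance_type_targets_py := by
  intro ts fc _
  exact pv_main ts fc
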